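-- pv_equiv track=rewrite | github.com/abasnfarah/CompetativeProgramming | competitions/codejam/2020/qual_round/Indicium/indicium.py | countRow
-- ===== SOURCE A (Python) =====
-- def countRow(m):
--     output = 0
--     for i in range(0,len(m)):
--         hashset = set()
--         for j in range(0,len(m[i])):
--             hashset.add(m[i][j])
--
--         if len(hashset) != len(m[i]):
--             output += 1
--     return output
-- ===== SOURCE B (Python) =====
-- def countRow(m):
--     count = 0
--     for row in m:
--         s = sorted(row)
--         if any(x == y for x, y in zip(s, s[1:])):
--             count += 1
--     return count
-- ===== Notes on version B (the rewrite author's own statement) =====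
-- stated objective: alternative
-- what changed: Detects a duplicated value in a row by sorting a copy of the row and scanning adjacent pairs, instead of building a hash set and comparing its size to the row length.
import Mathlib
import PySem

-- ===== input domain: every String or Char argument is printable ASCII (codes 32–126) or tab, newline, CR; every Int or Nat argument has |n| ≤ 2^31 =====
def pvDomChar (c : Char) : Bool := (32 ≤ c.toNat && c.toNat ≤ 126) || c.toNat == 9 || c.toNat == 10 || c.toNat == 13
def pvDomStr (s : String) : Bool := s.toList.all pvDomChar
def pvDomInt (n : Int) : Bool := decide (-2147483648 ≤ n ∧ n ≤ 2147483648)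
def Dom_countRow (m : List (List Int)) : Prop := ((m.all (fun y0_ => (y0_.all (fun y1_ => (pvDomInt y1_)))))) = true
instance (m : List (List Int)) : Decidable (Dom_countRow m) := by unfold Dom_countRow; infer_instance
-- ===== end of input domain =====

-- B detects a duplicated value in a row by sorting a copy of the row and scanning adjacent pairs,
-- instead of A's hash-set-size comparison; objective: alternative algorithm, same result.

-- ===== PORT A =====
def countRow (m : List (List Int)) : Int :=
  (PySem.List.pyRange 0 (PySem.List.len m) 1).foldl
    (fun output i =>
      let row := PySem.List.pyGetD m i []
      let hashset :=
        (PySem.List.pyRange 0 (PySem.List.len row) 1).foldl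
          (fun hs j => PySem.Set.add hs (PySem.List.pyGetD row j 0)) PySem.Set.empty
      if PySem.Set.len hashset ≠ PySem.List.len row then output + 1 else output)
    0

-- ===== PORT B =====
def countRow_alt (m : List (List Int)) : Int :=
  m.foldl
    (fun count row =>
      let s := PySem.List.sorted row (fun x => x) false
      if (s.zip (PySem.List.slice s (some 1) none)).any (fun p => p.1 == p.2)
      then count + 1 else count)
    0

-- ===== PRECONDITION & SPEC =====
def Spec_countRow (m : List (List Int)) (out : Int) : Prop := out = countRow_alt m
instance (m : List (List Int)) (out : Int) : Decidable (Spec_countRow m out) := by unfold Spec_countRow; infer_instance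

-- ===== CLAIM (what is proved, stated in full; the proofs are below) =====
def Claim_equal_countRow : Prop := ∀ (m : List (List Int)), Dom_countRow m → Spec_countRow m (countRow m)

-- ===== LEMMAS AND PROOFS =====

-- a ≤-sorted list has an equal adjacent pair iff it has a duplicate
lemma adj_iff_not_nodup (s : List Int) (hp : s.Pairwise (· ≤ ·)) :
    ((s.zip s.tail).any (fun p => p.1 == p.2) = true) ↔ ¬ s.Nodup := by
  induction s with
  | nil => simp
  | cons a t ih =>
    cases t with
    | nil => simp
    | cons b u =>
      have hp' : (b :: u).Pairwise (· ≤ ·) := hp.tail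
      have hab : a ≤ b := (List.pairwise_cons.mp hp).1 b (by simp)
      have hbu : ∀ x ∈ u, b ≤ x := fun x hx => (List.pairwise_cons.mp hp').1 x hx
      simp only [List.tail, List.zip_cons_cons, List.any_cons, Bool.or_eq_true, beq_iff_eq]
      simp only [List.tail_cons] at ih
      rw [ih hp']
      constructor
      · rintro (rfl | h)
        · simp
        · exact fun hnd => h hnd.tail
      · intro h
        by_cases hab' : a = b
        · exact Or.inl hab'
        · right
          intro hnd
          apply h
          refine List.nodup_cons.mpr ⟨?_, hnd⟩
          intro hmem
          rcases List.mem_cons.mp hmem with rfl | hx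
          · exact hab' rfl
          · have := hbu a hx
            have hlt : a < b := lt_of_le_of_ne hab hab'
            omega

-- A's set-size test equals B's sorted-adjacent test, row by row
lemma row_cond (row : List Int) :
    (PySem.Set.len (PySem.Set.ofList row) ≠ PySem.List.len row) ↔
    (((PySem.List.sorted row (fun x => x) false).zip
        (PySem.List.sorted row (fun x => x) false).tail).any (fun p => p.1 == p.2) = true) := by
  have hperm : (PySem.List.sorted row (fun x => x) false).Perm row :=
    PySem.List.sorted_perm row (fun x => x) false
  have hpair : (PySem.List.sorted row (fun x => x) false).Pairwise (· ≤ ·) :=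
    PySem.List.sorted_pairwise row (fun x => x)
  rw [adj_iff_not_nodup _ hpair, hperm.nodup_iff]
  have hlen : (PySem.Set.ofList row).length = row.length ↔ row.Nodup := by
    constructor
    · intro h
      have hnd := PySem.Set.nodup_ofList (xs := row)
      have hsub : PySem.Set.ofList row ⊆ row := fun x hx => (PySem.Set.mem_ofList row x).mp hx
      have hsp : List.Subperm (PySem.Set.ofList row) row := hnd.subperm hsub
      exact ((hsp.perm_of_length_le (by omega)).nodup_iff).mp hnd
    · intro h
      rw [PySem.Set.ofList_eq_self_of_nodup row h]
  simp only [PySem.Set.len, PySem.List.len, ne_eq, Nat.cast_inj]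
  exact not_congr hlen

-- the per-row bodies of the two folds agree
lemma body_eq (output : Int) (row : List Int) :
    (if PySem.Set.len ((PySem.List.pyRange 0 (PySem.List.len row) 1).foldl
          (fun hs j => PySem.Set.add hs (PySem.List.pyGetD row j 0)) PySem.Set.empty)
        ≠ PySem.List.len row then output + 1 else output) =
    (if ((PySem.List.sorted row (fun x => x) false).zip
          (PySem.List.slice (PySem.List.sorted row (fun x => x) false) (some 1) none)).any
          (fun p => p.1 == p.2)
     then output + 1 else output) := by
  rw [PySem.List.foldl_pyRange_zero_pyGetD row 0 (fun hs x => PySem.Set.add hs x) PySem.Set.empty]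
  have hset : row.foldl PySem.Set.add PySem.Set.empty = PySem.Set.ofList row := rfl
  rw [hset, PySem.List.slice_from_one]
  by_cases h : PySem.Set.len (PySem.Set.ofList row) ≠ PySem.List.len row
  · rw [if_pos h, if_pos ((row_cond row).mp h)]
  · rw [if_neg h]
    have hb := (row_cond row).not.mp h
    simp only [Bool.not_eq_true] at hb
    rw [hb]
    simp

-- ===== VERDICT (by name: the statement is the Claim_ definition above) =====
theorem countRow_spec : Claim_equal_countRow := by
  intro m _
  simp only [Spec_countRow]
  unfold countRow countRow_alt
  rw [PySem.List.foldl_pyRange_zero_pyGetD m ([] : List Int)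
    (fun output row =>
      if PySem.Set.len ((PySem.List.pyRange 0 (PySem.List.len row) 1).foldl
          (fun hs j => PySem.Set.add hs (PySem.List.pyGetD row j 0)) PySem.Set.empty)
        ≠ PySem.List.len row then output + 1 else output) 0]
  apply List.foldl_ext
  intro output row _
  exact body_eq output row
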